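-- pv_equiv track=rewrite | github.com/evanoc3/advent-of-code | src/day_10/puzzle_02/solution.py | calculate_score_for
-- ===== SOURCE A (Python) =====
-- def calculate_score_for(completion_string: str) -> int:
-- 	accumulator = 0
-- 	scores = { ")": 1, "]": 2, "}": 3, ">": 4 }
-- 	for char in completion_string:
-- 		accumulator *= 5
-- 		assert char in ")]}>"
-- 		accumulator += scores[char]
-- 	return accumulator
-- ===== SOURCE B (Python) =====
-- def calculate_score_for(completion_string: str) -> int:
-- 	total = 0
-- 	weight = 1
-- 	for char in reversed(completion_string):
-- 		assert char in ")]}>"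
-- 		total += (")]}>".index(char) + 1) * weight
-- 		weight *= 5
-- 	return total
-- ===== Notes on version B (the rewrite author's own statement) =====
-- stated objective: alternative
-- what changed: Replaces the left-to-right Horner multiply-accumulate with a dict lookup by a right-to-left pass keeping a running positional weight (total, weight) and scoring each character via its index in the string ")]}>"; no dict and no Horner step.
import Mathlib
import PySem

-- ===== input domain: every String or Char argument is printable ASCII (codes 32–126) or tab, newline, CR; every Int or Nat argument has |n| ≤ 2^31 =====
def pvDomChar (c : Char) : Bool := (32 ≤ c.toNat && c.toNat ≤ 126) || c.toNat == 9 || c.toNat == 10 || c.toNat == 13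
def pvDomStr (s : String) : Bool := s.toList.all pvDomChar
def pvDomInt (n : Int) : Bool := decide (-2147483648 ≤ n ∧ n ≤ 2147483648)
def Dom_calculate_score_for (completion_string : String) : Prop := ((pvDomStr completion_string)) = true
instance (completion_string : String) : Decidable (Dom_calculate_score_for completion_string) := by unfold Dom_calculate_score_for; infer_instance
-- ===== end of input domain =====

-- B scores right-to-left with a running positional weight and an index lookup in ")]}>",
-- instead of A's left-to-right Horner pass over a dict (objective: alternative, not speed).

-- ===== PORT A =====
-- lookup in the literal dict { ")": 1, "]": 2, "}": 3, ">": 4 } (0 is unreachable under Pre_)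
def pvScoreA (c : Char) : Int :=
  if c = ')' then 1 else if c = ']' then 2 else if c = '}' then 3 else if c = '>' then 4 else 0

def calculate_score_for (completion_string : String) : Int :=
  completion_string.toList.foldl (fun accumulator char => accumulator * 5 + pvScoreA char) 0

-- ===== PORT B =====
-- ")]}>".index(char) + 1; the getD 0 branch is unreachable under Pre_ (the assert fires first)
def pvScoreB (c : Char) : Int :=
  (PySem.List.index? [')', ']', '}', '>'] c).getD 0 + 1

def calculate_score_for_alt (completion_string : String) : Int :=
  (completion_string.toList.reverse.foldl
      (fun (p : Int × Int) char => (p.1 + pvScoreB char * p.2, p.2 * 5))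
      ((0 : Int), (1 : Int))).1

-- ===== PRECONDITION & SPEC =====
-- Pre_ excludes exactly the strings containing a character outside ")]}>", on which the Python A
-- (and B) raises AssertionError.
def Pre_calculate_score_for (completion_string : String) : Prop :=
  completion_string.toList.all (fun c => c = ')' ∨ c = ']' ∨ c = '}' ∨ c = '>')
instance (completion_string : String) : Decidable (Pre_calculate_score_for completion_string) := by
  unfold Pre_calculate_score_for; infer_instance

def pvWitness_calculate_score_for : String := ("}]>)")

def Spec_calculate_score_for (completion_string : String) (out : Int) : Prop := out = calculate_score_for_alt completion_string
instance (completion_string : String) (out : Int) : Decidable (Spec_calculate_score_for completion_string out) := by unfold Spec_calculate_score_for; infer_instance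

-- ===== CLAIM =====
def Claim_equal_calculate_score_for : Prop := ∀ (completion_string : String), Dom_calculate_score_for completion_string → Pre_calculate_score_for completion_string → Spec_calculate_score_for completion_string (calculate_score_for completion_string)

-- ===== LEMMAS AND PROOFS =====

-- positional value of a list read most-significant first, with A's scores
def pvPos : List Char → Int
  | [] => 0
  | x :: xs => pvScoreA x * 5 ^ xs.length + pvPos xs

theorem pvHorner (l : List Char) : ∀ a : Int,
    l.foldl (fun accumulator char => accumulator * 5 + pvScoreA char) a
      = a * 5 ^ l.length + pvPos l := by
  induction l with
  | nil => intro a; simp [pvPos]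
  | cons x xs ih =>
    intro a
    simp only [List.foldl_cons, ih, pvPos, List.length_cons, pow_succ]
    ring

-- little-endian value with B's scores
def pvLE : List Char → Int
  | [] => 0
  | x :: xs => pvScoreB x + 5 * pvLE xs

theorem pvFoldB (u : List Char) : ∀ (t w : Int),
    u.foldl (fun (p : Int × Int) char => (p.1 + pvScoreB char * p.2, p.2 * 5)) (t, w)
      = (t + w * pvLE u, w * 5 ^ u.length) := by
  induction u with
  | nil => intro t w; simp [pvLE]
  | cons x xs ih =>
    intro t w
    rw [List.foldl_cons, ih]
    simp only [pvLE, List.length_cons, pow_succ, Prod.mk.injEq]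
    constructor <;> ring

def pvValid (c : Char) : Prop := c = ')' ∨ c = ']' ∨ c = '}' ∨ c = '>'

theorem pvScore_eq (c : Char) (h : pvValid c) : pvScoreB c = pvScoreA c := by
  rcases h with h | h | h | h <;> subst h <;> decide

theorem pvLE_append (u : List Char) (x : Char) :
    pvLE (u ++ [x]) = pvLE u + 5 ^ u.length * pvScoreB x := by
  induction u with
  | nil => simp [pvLE]
  | cons y ys ih => simp [pvLE, ih, pow_succ]; ring

theorem pvLE_reverse (l : List Char) (h : ∀ c ∈ l, pvValid c) :
    pvLE l.reverse = pvPos l := by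
  induction l with
  | nil => rfl
  | cons x xs ih =>
    simp only [List.reverse_cons, pvLE_append, pvPos, List.length_reverse]
    rw [ih (fun c hc => h c (List.mem_cons_of_mem _ hc)),
        pvScore_eq x (h x List.mem_cons_self)]
    ring

-- ===== VERDICT =====
theorem calculate_score_for_spec : Claim_equal_calculate_score_for := by
  intro s _ hpre
  unfold Spec_calculate_score_for calculate_score_for calculate_score_for_alt
  rw [pvHorner, pvFoldB]
  have hall : ∀ c ∈ s.toList, pvValid c := by
    intro c hc
    have := List.all_eq_true.mp hpre c hc
    simpa [pvValid] using this
  simp [pvLE_reverse _ hall]
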